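-- pv_equiv track=rewrite | github.com/tkamenick/kicad-autopilot | src/sexpr_parser.py | tokenize
-- ===== SOURCE A (Python) =====
-- def tokenize(text: str) -> list[str]:
--     """Split KiCad s-expression text into a flat token list.
--
--     Tokens are: '(', ')', quoted strings (with surrounding quotes stripped),
--     and bare words.
--     """
--     tokens: list[str] = []
--     i = 0
--     n = len(text)
--     while i < n:
--         c = text[i]
--         if c in " \t\n\r":
--             i += 1
--         elif c == "(":
--             tokens.append("(")
--             i += 1
--         elif c == ")":
--             tokens.append(")")
--             i += 1
--         elif c == '"':
--             # Quoted string — scan to closing quote, handling \" escapes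
--             i += 1
--             buf: list[str] = []
--             while i < n:
--                 ch = text[i]
--                 if ch == "\\":
--                     i += 1
--                     if i < n:
--                         esc = text[i]
--                         buf.append("\n" if esc == "n" else "\t" if esc == "t" else esc)
--                         i += 1
--                 elif ch == '"':
--                     i += 1
--                     break
--                 else:
--                     buf.append(ch)
--                     i += 1
--             tokens.append("".join(buf))
--         else:
--             # Bare word: read until whitespace, paren, or EOF
--             start = i
--             while i < n and text[i] not in " \t\n\r()":
--                 i += 1
--             tokens.append(text[start:i])
--     return tokens
-- ===== SOURCE B (Python) =====
-- def tokenize(text: str) -> list[str]: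
--     """One-pass DFA tokenizer: a single loop over the characters with an
--     explicit state (NORMAL/WORD/STRING/ESCAPE) instead of nested
--     index-advancing scan loops."""
--     NORMAL, WORD, STRING, ESCAPE = 0, 1, 2, 3
--     tokens: list[str] = []
--     state = NORMAL
--     buf: list[str] = []
--     for c in text:
--         if state == NORMAL:
--             if c in " \t\n\r":
--                 pass
--             elif c == "(":
--                 tokens.append("(")
--             elif c == ")":
--                 tokens.append(")")
--             elif c == '"':
--                 state = STRING
--                 buf = []
--             else:
--                 state = WORD
--                 buf = [c]
--         elif state == WORD:
--             if c in " \t\n\r":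
--                 tokens.append("".join(buf))
--                 state = NORMAL
--             elif c == "(" or c == ")":
--                 tokens.append("".join(buf))
--                 tokens.append(c)
--                 state = NORMAL
--             else:
--                 buf.append(c)
--         elif state == STRING:
--             if c == "\\":
--                 state = ESCAPE
--             elif c == '"':
--                 tokens.append("".join(buf))
--                 state = NORMAL
--                 buf = []
--             else:
--                 buf.append(c)
--         else:  # ESCAPE
--             buf.append("\n" if c == "n" else "\t" if c == "t" else c)
--             state = STRING
--     if state != NORMAL:
--         tokens.append("".join(buf))
--     return tokens
-- ===== Notes on version B (the rewrite author's own statement) =====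
-- stated objective: alternative
-- what changed: Replaced A's nested index-advancing scan loops (manual i/n bookkeeping with inner while-loops for quoted strings and bare words) by a single-pass DFA: one loop over the characters with an explicit NORMAL/WORD/STRING/ESCAPE state and a token buffer, flushed at state transitions and at EOF.
import Mathlib
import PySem

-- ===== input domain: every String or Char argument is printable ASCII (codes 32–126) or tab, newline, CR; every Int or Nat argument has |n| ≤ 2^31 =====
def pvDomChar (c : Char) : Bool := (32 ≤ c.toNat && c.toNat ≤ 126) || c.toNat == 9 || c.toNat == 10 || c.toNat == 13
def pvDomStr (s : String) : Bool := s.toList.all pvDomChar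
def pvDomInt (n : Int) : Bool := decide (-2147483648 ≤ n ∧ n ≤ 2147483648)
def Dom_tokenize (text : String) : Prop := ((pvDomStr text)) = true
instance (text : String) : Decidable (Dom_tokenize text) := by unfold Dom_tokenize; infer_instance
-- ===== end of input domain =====

-- B replaces A's nested index-advancing scan loops by a single-pass DFA
-- (explicit NORMAL/WORD/STRING/ESCAPE state folded over the characters); alternative, same cost.

-- ===== PORT A =====
-- shared character classes (exact transliterations of A's "c in ' \t\n\r'" and word-stop tests)
def pvWs (c : Char) : Bool := c == ' ' || c == '\t' || c == '\n' || c == '\r'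
def pvWordChar (c : Char) : Bool := !(pvWs c || c == '(' || c == ')')
-- A's escape rule: "\n" if esc == "n" else "\t" if esc == "t" else esc
def pvMapEsc (e : Char) : Char := if e = 'n' then '\n' else if e = 't' then '\t' else e

-- A's inner quoted-string loop: returns (buf, remaining characters after the closing quote)
def pvScanStr : List Char → List Char → (List Char × List Char)
  | [], buf => (buf, [])
  | ch :: rest, buf =>
    if ch = '\\' then
      match rest with
      | [] => (buf, [])                              -- i += 1 ran off the end: loop exits
      | e :: rest' => pvScanStr rest' (buf ++ [pvMapEsc e])
    else if ch = '"' then (buf, rest)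
    else pvScanStr rest (buf ++ [ch])

theorem pvScanStr_len : ∀ (l b : List Char), (pvScanStr l b).2.length ≤ l.length := by
  intro l b
  fun_induction pvScanStr l b <;> simp_all <;> omega

-- A's outer while loop, one branch per Python branch; the bare-word inner scan is the takeWhile/dropWhile split
def pvTokA : List Char → List String
  | [] => []
  | c :: rest =>
    if pvWs c then pvTokA rest
    else if c = '(' then "(" :: pvTokA rest
    else if c = ')' then ")" :: pvTokA rest
    else if c = '"' then
      String.ofList (pvScanStr rest []).1 :: pvTokA (pvScanStr rest []).2
    else
      String.ofList ((c :: rest).takeWhile pvWordChar) :: pvTokA ((c :: rest).dropWhile pvWordChar)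
termination_by l => l.length
decreasing_by
  · simp
  · simp
  · simp
  · exact Nat.lt_succ_of_le (pvScanStr_len rest [])
  · rename_i h1 h2 h3 _
    have hc : pvWordChar c = true := by simp [pvWordChar, h2, h3]; simpa using h1
    simp [List.dropWhile, hc]
    exact List.length_dropWhile_le _ _

def tokenize (text : String) : List String := pvTokA text.toList

-- ===== PORT B =====
-- DFA step: state 0 = NORMAL, 1 = WORD, 2 = STRING, 3 = ESCAPE
def pvStepB : (List String × Nat × List Char) → Char → (List String × Nat × List Char)
  | (ts, s, b), c =>
    if s = 0 then
      if pvWs c then (ts, 0, b)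
      else if c = '(' then (ts ++ ["("], 0, b)
      else if c = ')' then (ts ++ [")"], 0, b)
      else if c = '"' then (ts, 2, [])
      else (ts, 1, [c])
    else if s = 1 then
      if pvWs c then (ts ++ [String.ofList b], 0, b)
      else if c = '(' || c = ')' then (ts ++ [String.ofList b, String.ofList [c]], 0, b)
      else (ts, 1, b ++ [c])
    else if s = 2 then
      if c = '\\' then (ts, 3, b)
      else if c = '"' then (ts ++ [String.ofList b], 0, [])
      else (ts, 2, b ++ [c])
    else (ts, 2, b ++ [pvMapEsc c])

-- the final "if state != NORMAL: tokens.append(''.join(buf))"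
def pvFinB : (List String × Nat × List Char) → List String
  | (ts, s, b) => if s = 0 then ts else ts ++ [String.ofList b]

def tokenize_alt (text : String) : List String := pvFinB (text.toList.foldl pvStepB ([], 0, []))

-- ===== PRECONDITION & SPEC =====
def Spec_tokenize (text : String) (out : List String) : Prop := out = tokenize_alt text
instance (text : String) (out : List String) : Decidable (Spec_tokenize text out) := by unfold Spec_tokenize; infer_instance

-- ===== CLAIM (what is proved, stated in full; the proofs are below) =====
def Claim_equal_tokenize : Prop := ∀ (text : String), Dom_tokenize text → Spec_tokenize text (tokenize text)

-- ===== LEMMAS AND PROOFS =====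

theorem pvScanStr_quote (rest b : List Char) : pvScanStr ('"' :: rest) b = (b, rest) := by
  rw [pvScanStr.eq_def]; simp

theorem pvScanStr_other (c : Char) (rest b : List Char) (h1 : ¬c = '\\') (h2 : ¬c = '"') :
    pvScanStr (c :: rest) b = pvScanStr rest (b ++ [c]) := by
  rw [pvScanStr.eq_def]; simp [h1, h2]

-- Invariant for the three live DFA states, by simultaneous strong induction on the suffix length.
theorem pvMain : ∀ (n : Nat) (l : List Char), l.length ≤ n →
    (∀ (ts : List String) (b : List Char), pvFinB (l.foldl pvStepB (ts, 0, b)) = ts ++ pvTokA l) ∧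
    (∀ (ts : List String) (b : List Char),
       pvFinB (l.foldl pvStepB (ts, 1, b)) =
         ts ++ String.ofList (b ++ l.takeWhile pvWordChar) :: pvTokA (l.dropWhile pvWordChar)) ∧
    (∀ (ts : List String) (b : List Char),
       pvFinB (l.foldl pvStepB (ts, 2, b)) =
         ts ++ String.ofList (pvScanStr l b).1 :: pvTokA (pvScanStr l b).2) := by
  intro n
  induction n with
  | zero =>
    intro l hl
    have hnil : l = [] := List.eq_nil_of_length_eq_zero (Nat.le_zero.mp hl)
    subst hnil
    refine ⟨?_, ?_, ?_⟩ <;> intro ts b <;> simp [pvFinB, pvTokA, pvScanStr]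
  | succ n ih =>
    intro l hl
    match l with
    | [] =>
      refine ⟨?_, ?_, ?_⟩ <;> intro ts b <;> simp [pvFinB, pvTokA, pvScanStr]
    | c :: rest =>
      have hr : rest.length ≤ n := by simp at hl; omega
      have ih0 := (ih rest hr).1
      have ih1 := (ih rest hr).2.1
      have ih2 := (ih rest hr).2.2
      refine ⟨?_, ?_, ?_⟩ <;> intro ts b
      · -- state 0
        by_cases hws : pvWs c
        · simp [List.foldl, pvStepB, hws, pvTokA, ih0]
        · by_cases h1 : c = '('
          · subst h1; simp [List.foldl, pvStepB, hws, pvTokA, ih0]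
          · by_cases h2 : c = ')'
            · subst h2; simp [List.foldl, pvStepB, hws, pvTokA, ih0]
            · by_cases h3 : c = '"'
              · subst h3; simp [List.foldl, pvStepB, hws, pvTokA, ih2]
              · have hc : pvWordChar c = true := by
                  simp [pvWordChar, h1, h2]; simpa using hws
                simp [List.foldl, pvStepB, hws, h1, h2, h3, pvTokA, ih1, hc]
      · -- state 1
        by_cases hws : pvWs c
        · have hc : pvWordChar c = false := by simp [pvWordChar, hws]
          simp [List.foldl, pvStepB, hws, pvTokA, ih0, hc]
        · by_cases h1 : c = '('
          · subst h1; simp [List.foldl, pvStepB, pvTokA, ih0, pvWordChar, pvWs]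
          · by_cases h2 : c = ')'
            · subst h2; simp [List.foldl, pvStepB, pvTokA, ih0, pvWordChar, pvWs]
            · have hc : pvWordChar c = true := by
                simp [pvWordChar, h1, h2]; simpa using hws
              simp [List.foldl, pvStepB, hws, h1, h2, ih1, hc]
      · -- state 2
        by_cases h1 : c = '\\'
        · subst h1
          match rest with
          | [] => simp [List.foldl, pvStepB, pvFinB, pvScanStr, pvTokA]
          | e :: r =>
            have hr2 : r.length ≤ n := by simp at hl; omega
            have ih2' := (ih r hr2).2.2
            simp [List.foldl, pvStepB, pvScanStr, ih2']
        · by_cases h2 : c = '"'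
          · subst h2; simp [List.foldl, pvStepB, pvScanStr_quote, ih0]
          · simp [List.foldl, pvStepB, h1, h2, pvScanStr_other c rest b h1 h2, ih2]

-- ===== VERDICT (by name: the statement is the Claim_ definition above) =====
theorem tokenize_spec : Claim_equal_tokenize := by
  intro text _
  unfold Spec_tokenize tokenize tokenize_alt
  have h := (pvMain text.toList.length text.toList le_rfl).1 [] []
  simp [h]
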